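-- pv_equiv track=rewrite | github.com/OscarPellicer/pptx2marp | pptx2md/outputter/base.py | get_inline_code
-- ===== SOURCE A (Python) =====
-- def get_inline_code(text: str) -> str:
--     """Formats text as inline code. Does not strip or escape input text.
--        Handles literal backticks within the text by using a longer fence.
--     """
--     if not text: # If the original run text was empty.
--         return ""
--
--     # Find the longest sequence of backticks in the text
--     longest_backtick_sequence = 0
--     current_backtick_sequence = 0
--     for char in text:
--         if char == '`':
--             current_backtick_sequence += 1
--         else:
--             longest_backtick_sequence = max(longest_backtick_sequence, current_backtick_sequence)
--             current_backtick_sequence = 0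
--     longest_backtick_sequence = max(longest_backtick_sequence, current_backtick_sequence)
--
--     # The fence should be one longer than the longest sequence found
--     fence_len = longest_backtick_sequence + 1
--     fence = '`' * fence_len
--
--     # If the text starts or ends with a backtick, or is all backticks,
--     # and the chosen fence is just one backtick,
--     # then a space is needed to disambiguate (CommonMark spec).
--     # Example: ` `` ` vs `` ` ``. If text is '`a`' and fence is '`', then '` `a` `'
--     # However, if fence_len > 1, this space padding is generally not needed.
--     # For simplicity and robustness with `fence_len > 1`, just add fence.
--     # If `text` is just '`', `fence_len` will be 2, result "`` ` ``".
--     # If `text` is 'a`b', `fence_len` will be 2, result "``a`b``".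
--
--     # A common strategy for CommonMark compliance with content starting/ending with backticks
--     # or being all backticks, when the fence is a single backtick:
--     if fence_len == 1 and (text.startswith('`') or text.endswith('`') or text.isspace()):
--          return f"{fence} {text} {fence}"
--
--     return f"{fence}{text}{fence}"
-- ===== SOURCE B (Python) =====
-- def get_inline_code(text: str) -> str:
--     """Formats text as inline code. Does not strip or escape input text.
--        Handles literal backticks within the text by using a longer fence.
--     """
--     if not text:
--         return ""
--
--     # Probe for the shortest backtick fence that does not occur in the text:
--     # a fence of length k appears in the text iff some backtick run has
--     # length >= k, so the first absent fence is one longer than the longest run.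
--     fence = '`'
--     while fence in text:
--         fence += '`'
--
--     if len(fence) == 1 and (text.startswith('`') or text.endswith('`') or text.isspace()):
--         return f"{fence} {text} {fence}"
--
--     return f"{fence}{text}{fence}"
-- ===== Notes on version B (the rewrite author's own statement) =====
-- stated objective: faster
-- what changed: Replaces A's per-character running-counter scan for the longest backtick run by fence probing: starting from a single backtick, the fence is grown by one backtick as long as it still occurs as a substring of the text; the empty-text guard and the trailing padding/concatenation logic are kept.
import Mathlib
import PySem

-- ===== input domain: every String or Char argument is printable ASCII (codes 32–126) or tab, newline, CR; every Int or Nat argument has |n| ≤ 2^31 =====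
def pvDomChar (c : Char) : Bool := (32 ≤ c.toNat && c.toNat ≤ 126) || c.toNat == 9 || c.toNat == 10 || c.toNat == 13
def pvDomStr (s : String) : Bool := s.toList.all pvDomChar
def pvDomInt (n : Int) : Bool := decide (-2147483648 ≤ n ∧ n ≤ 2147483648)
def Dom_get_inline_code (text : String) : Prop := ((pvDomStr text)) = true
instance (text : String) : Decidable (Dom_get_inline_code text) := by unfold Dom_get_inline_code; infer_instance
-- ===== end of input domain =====

-- B replaces A's running-counter scan for the longest backtick run by probing for the
-- shortest backtick fence absent from the text (objective: faster; a timing run measured B faster at the largest size).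

-- ===== PORT A =====
-- string concatenation of the f-strings is done on .toList (exact: Python + on str is List.append on the chars)
def get_inline_code (text : String) : String :=
  if text = "" then ""
  else
    -- for char in text: running (longest, current) backtick-run counters
    let p := text.toList.foldl
      (fun (st : Int × Int) c =>
        if c = '`' then (st.1, st.2 + 1) else (max st.1 st.2, 0)) (0, 0)
    let longest := max p.1 p.2
    let fence_len := longest + 1
    let fence : List Char := PySem.List.pyRepeat ['`'] fence_len   -- '`' * fence_len
    if fence_len == 1 && (PySem.Str.startswith text "`" || PySem.Str.endswith text "`" || PySem.Str.strIsspace text) then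
      String.mk (fence ++ ' ' :: text.toList ++ ' ' :: fence)
    else
      String.mk (fence ++ text.toList ++ fence)

-- ===== PORT B =====
-- while fence in text: fence += '`'   (terminates: an occurring fence is no longer than the text)
def pvProbeFence (t fence : List Char) : List Char :=
  if h : PySem.Chars.isIn fence t = true then pvProbeFence t (fence ++ ['`'])
  else fence
termination_by t.length + 1 - fence.length
decreasing_by
  have := List.IsInfix.length_le ((PySem.Chars.isIn_iff_infix _ _).mp h)
  simp only [List.length_append, List.length_cons, List.length_nil]
  omega

def get_inline_code_alt (text : String) : String :=
  if text = "" then ""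
  else
    let fence := pvProbeFence text.toList ['`']
    if fence.length == 1 && (PySem.Str.startswith text "`" || PySem.Str.endswith text "`" || PySem.Str.strIsspace text) then
      String.mk (fence ++ ' ' :: text.toList ++ ' ' :: fence)
    else
      String.mk (fence ++ text.toList ++ fence)

-- ===== PRECONDITION & SPEC =====
def Spec_get_inline_code (text : String) (out : String) : Prop := out = get_inline_code_alt text
instance (text : String) (out : String) : Decidable (Spec_get_inline_code text out) := by unfold Spec_get_inline_code; infer_instance

-- ===== CLAIM (what is proved, stated in full; the proofs are below) =====
def Claim_equal_get_inline_code : Prop := ∀ (text : String), Dom_get_inline_code text → Spec_get_inline_code text (get_inline_code text)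

-- ===== LEMMAS AND PROOFS =====

-- the longest backtick run of l, with `cur` credit for a run already in progress at the left end
def pvMrun (cur : Int) : List Char → Int
  | [] => cur
  | c :: t => if c = '`' then pvMrun (cur + 1) t else max cur (pvMrun 0 t)

theorem pvMrun_nonneg (l : List Char) : ∀ cur : Int, 0 ≤ cur → 0 ≤ pvMrun cur l := by
  induction l with
  | nil => intro cur h; simpa [pvMrun] using h
  | cons c t ih =>
    intro cur h
    by_cases hc : c = '`' <;> simp [pvMrun, hc]
    · exact ih _ (by omega)
    · left; exact h

theorem pvFold_eq (l : List Char) : ∀ lo cur : Int,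
    (let p := l.foldl (fun (st : Int × Int) c =>
        if c = '`' then (st.1, st.2 + 1) else (max st.1 st.2, 0)) (lo, cur);
     max p.1 p.2) = max lo (pvMrun cur l) := by
  induction l with
  | nil => intro lo cur; simp [pvMrun]
  | cons c t ih =>
    intro lo cur
    by_cases hc : c = '`'
    · simp only [List.foldl_cons, pvMrun, hc, if_pos]
      simpa using ih lo (cur + 1)
    · simp only [List.foldl_cons, pvMrun, if_neg hc]
      have := ih (max lo cur) 0
      simp only [this]
      omega

theorem pvRepl_prefix_iff (k : Nat) (l : List Char) :
    List.replicate k '`' <+: l ↔ k ≤ (l.takeWhile (· = '`')).length := by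
  induction k generalizing l with
  | zero => simp
  | succ k ih =>
    cases l with
    | nil => simp [List.replicate_succ]
    | cons c t =>
      by_cases hc : c = '`'
      · subst hc
        simp [List.replicate_succ, List.cons_prefix_cons, ih, List.takeWhile_cons]
      · simp [List.replicate_succ, List.cons_prefix_cons, List.takeWhile_cons, hc, Ne.symm hc]

theorem pvMrun_le_iff (l : List Char) : ∀ (k : Nat), 1 ≤ k → ∀ cur : Int, 0 ≤ cur →
    ((k : Int) ≤ pvMrun cur l ↔
      (k : Int) ≤ cur + (l.takeWhile (· = '`')).length ∨ List.replicate k '`' <:+: l) := by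
  induction l with
  | nil =>
    intro k hk cur hcur
    simp [pvMrun, List.infix_nil, List.replicate_eq_nil_iff]
    omega
  | cons c t ih =>
    intro k hk cur hcur
    by_cases hc : c = '`'
    · subst hc
      have hlead : (('`' :: t).takeWhile (· = '`')).length = (t.takeWhile (· = '`')).length + 1 := by
        simp [List.takeWhile_cons]
      have hmr : pvMrun cur ('`' :: t) = pvMrun (cur + 1) t := by simp [pvMrun]
      rw [hmr, ih k hk (cur + 1) (by omega), hlead]
      have hinf : List.replicate k '`' <:+: ('`' :: t) ↔
          (k : Int) ≤ (t.takeWhile (· = '`')).length + 1 ∨ List.replicate k '`' <:+: t := by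
        rw [List.infix_cons_iff]
        constructor
        · rintro (hp | hi)
          · left
            have := (pvRepl_prefix_iff k ('`' :: t)).mp hp
            rw [hlead] at this
            push_cast
            omega
          · right; exact hi
        · rintro (hle | hi)
          · left
            apply (pvRepl_prefix_iff k ('`' :: t)).mpr
            rw [hlead]
            omega
          · right; exact hi
      rw [hinf]
      by_cases hP : List.replicate k '`' <:+: t
      · simp [hP]
      · simp only [hP, or_false]
        push_cast
        omega
    · have hlead : ((c :: t).takeWhile (· = '`')) = [] := by
        simp [List.takeWhile_cons, hc]
      have hmr : pvMrun cur (c :: t) = max cur (pvMrun 0 t) := by simp [pvMrun, hc]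
      have habs : List.replicate k '`' <:+: (c :: t) ↔ List.replicate k '`' <:+: t := by
        rw [List.infix_cons_iff]
        constructor
        · rintro (hp | hi)
          · exfalso
            cases k with
            | zero => omega
            | succ k =>
              rw [List.replicate_succ, List.cons_prefix_cons] at hp
              exact hc hp.1.symm
          · exact hi
        · intro hi; right; exact hi
      have hpre : (k : Int) ≤ ((t.takeWhile (· = '`')).length : Int) →
          List.replicate k '`' <:+: t := by
        intro h
        exact ((pvRepl_prefix_iff k t).mpr (by omega)).isInfix
      rw [hmr, hlead, habs]
      have h0 := ih k hk 0 le_rfl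
      simp only [List.length_nil, Nat.cast_zero, add_zero, zero_add] at h0 ⊢
      constructor
      · intro h
        rcases le_max_iff.mp h with h1 | h2
        · left; exact h1
        · rcases h0.mp h2 with h3 | h4
          · right; exact hpre h3
          · right; exact h4
      · rintro (h | h)
        · exact le_max_of_le_left h
        · exact le_max_of_le_right (h0.mpr (Or.inr h))

-- isIn of a backtick fence ↔ the fence is no longer than the longest run
theorem pvIsIn_iff (l : List Char) (k : Nat) (hk : 1 ≤ k) :
    PySem.Chars.isIn (List.replicate k '`') l = true ↔ (k : Int) ≤ pvMrun 0 l := by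
  rw [PySem.Chars.isIn_iff_infix, pvMrun_le_iff l k hk 0 le_rfl]
  constructor
  · intro h; right; exact h
  · rintro (h | h)
    · exact ((pvRepl_prefix_iff k l).mpr (by exact_mod_cast by simpa using h)).isInfix
    · exact h

theorem pvProbe_eq (l : List Char) (M : Nat) (hM : pvMrun 0 l = (M : Int)) :
    ∀ j k : Nat, 1 ≤ k → k + j = M + 1 →
      pvProbeFence l (List.replicate k '`') = List.replicate (M + 1) '`' := by
  intro j
  induction j with
  | zero =>
    intro k hk hkj
    have hfalse : ¬ PySem.Chars.isIn (List.replicate k '`') l = true := by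
      rw [pvIsIn_iff l k hk, hM]
      push_cast; omega
    obtain rfl : k = M + 1 := by omega
    rw [pvProbeFence, dif_neg hfalse]
  | succ j ih =>
    intro k hk hkj
    have htrue : PySem.Chars.isIn (List.replicate k '`') l = true := by
      rw [pvIsIn_iff l k hk, hM]
      push_cast; omega
    rw [pvProbeFence, dif_pos htrue, ← List.replicate_succ']
    exact ih (k + 1) (by omega) (by omega)

theorem get_inline_code_spec : Claim_equal_get_inline_code := by
  intro text _
  unfold Spec_get_inline_code get_inline_code get_inline_code_alt
  by_cases h0 : text = ""
  · simp [h0]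
  · have hnn : 0 ≤ pvMrun 0 text.toList := pvMrun_nonneg _ 0 le_rfl
    obtain ⟨M, hM⟩ : ∃ M : Nat, pvMrun 0 text.toList = (M : Int) :=
      ⟨(pvMrun 0 text.toList).toNat, (Int.toNat_of_nonneg hnn).symm⟩
    have hfold := pvFold_eq text.toList 0 0
    simp only [hM] at hfold
    have hmax : max (0 : Int) (M : Int) = (M : Int) := max_eq_right (by positivity)
    rw [hmax] at hfold
    have hfenceB : pvProbeFence text.toList ['`'] = List.replicate (M + 1) '`' := by
      have h1 : (['`'] : List Char) = List.replicate 1 '`' := rfl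
      rw [h1]
      exact pvProbe_eq text.toList M hM M 1 le_rfl (by omega)
    have ht : ((M : Int) + 1).toNat = M + 1 := by omega
    have hbeq : (((M : Int) + 1) == (1 : Int)) = ((M + 1) == 1) := by
      rcases Nat.eq_zero_or_pos M with hMz | hMp
      · subst hMz; norm_num
      · have h1 : (((M : Int) + 1) == (1 : Int)) = false := by simp; omega
        have h2 : ((M + 1) == 1) = false := by simp; omega
        rw [h1, h2]
    simp only [h0, reduceIte, hfold, PySem.List.pyRepeat_singleton, ht, hfenceB,
      List.length_replicate, hbeq]
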